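-- pv_equiv track=rewrite | github.com/PeytonRoden/VLFQEDCI | VariationalLangFirsov_QEDCI/QEDCI.py | generate_active_space_excited_determinants
-- ===== SOURCE A (Python) =====
-- import itertools
--
-- def generate_active_space_excited_determinants( active_reference, active_virtual_orbitals, inactive_reference, N):
--       """
--       Generate all possible determinants for N excitations from a reference determinant.
--
--       Parameters:
--       - active_reference: Tuple of two lists, (reference_alpha, reference_beta), the occupied alpha and beta spatial orbitals in the reference determinant that are active
--       - inactive_reference: Tuple of two lists, (reference_alpha, reference_beta), the occupied alpha and beta spatial orbitals in the reference determinant that are inactive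
--       - active_virtual_orbitals: Tuple of two lists, (virtual_alpha, virtual_beta), the unoccupied alpha and beta spatial orbitals, in the active virtual space
--       - N: Integer, the number of excitations (1 for single, 2 for double, etc.).
--
--       Returns:
--       - A list of tuples, where each tuple represents an excited determinant as (excited_alpha, excited_beta).
--       """
--       reference_alpha, reference_beta = active_reference
--       virtual_alpha, virtual_beta = active_virtual_orbitals
--
--       # Generate all combinations of N occupied and N virtual orbitals for alpha and beta spins
--       excited_determinants = []
--
--       # Loop over possible numbers of alpha and beta excitations
--       for n_alpha in range(N + 1):
--           n_beta = N - n_alpha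
--
--           # Skip if n_alpha or n_beta exceeds the number of available orbitals
--           if n_alpha > len(reference_alpha) or n_beta > len(reference_beta):
--               continue
--           if n_alpha > len(virtual_alpha) or n_beta > len(virtual_beta):
--               continue
--
--           # Generate all combinations of alpha excitations
--           for occ_alpha in itertools.combinations(reference_alpha, n_alpha):
--               for virt_alpha in itertools.combinations(virtual_alpha, n_alpha):
--                   # Generate all combinations of beta excitations
--                   for occ_beta in itertools.combinations(reference_beta, n_beta):
--                       for virt_beta in itertools.combinations(virtual_beta, n_beta):
--                           # Construct the excited determinant
--                           excited_alpha = sorted(list(set(reference_alpha) - set(occ_alpha)) + list(virt_alpha))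
--                           excited_beta = sorted(list(set(reference_beta) - set(occ_beta)) + list(virt_beta))
--                           excited_determinants.append(( tuple(excited_alpha), tuple(excited_beta)))
--
--
--       i = 0
--
--       for excited_determinant in excited_determinants:
--           excited_determinants[i] = tuple( (  tuple(list(inactive_reference[0] + list(excited_determinant[0]))) ,  tuple(list(inactive_reference[1] + list(excited_determinant[1])))) )
--           i +=1
--
--
--       return excited_determinants
-- ===== SOURCE B (Python) =====
-- def _combs(items, k):
--     # all k-element combinations of items, in itertools order, by choose/skip recursion
--     if k == 0:
--         return [[]]
--     if not items:
--         return []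
--     rest = items[1:]
--     return [[items[0]] + c for c in _combs(rest, k - 1)] + _combs(rest, k)
--
--
-- def _insort(det, x):
--     # insert x into the sorted list det, after any equal elements (linear scan)
--     i = 0
--     while i < len(det) and det[i] <= x:
--         i += 1
--     det.insert(i, x)
--
--
-- def _channel_dets(prefix, ref, virt, n):
--     # all n-fold excitations of one spin channel, with the inactive prefix folded in
--     base = sorted(set(ref))
--     dets = []
--     for occ in _combs(ref, n):
--         kept = [x for x in base if x not in occ]
--         for v in _combs(virt, n):
--             det = list(kept)
--             for x in v:
--                 _insort(det, x)
--             dets.append(tuple(prefix + det))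
--     return dets
--
--
-- def generate_active_space_excited_determinants(active_reference, active_virtual_orbitals, inactive_reference, N):
--     reference_alpha, reference_beta = active_reference
--     virtual_alpha, virtual_beta = active_virtual_orbitals
--     out = []
--     for n_alpha in range(N + 1):
--         n_beta = N - n_alpha
--         if n_alpha > len(reference_alpha) or n_beta > len(reference_beta):
--             continue
--         if n_alpha > len(virtual_alpha) or n_beta > len(virtual_beta):
--             continue
--         alpha_dets = _channel_dets(inactive_reference[0], reference_alpha, virtual_alpha, n_alpha)
--         beta_dets = _channel_dets(inactive_reference[1], reference_beta, virtual_beta, n_beta)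
--         for a in alpha_dets:
--             for b in beta_dets:
--                 out.append((a, b))
--     return out
-- ===== Notes on version B (the rewrite author's own statement) =====
-- stated objective: alternative
-- what changed: B replaces A's itertools+four-nested-loops with a recursive choose/skip combination generator and a per-channel construction: it sorts the deduplicated reference once, filters it per occupied choice and inserts virtuals by linear insertion into the already-sorted list (no per-pair set difference + full sort), folds the inactive prefix in, and pairs the two precomputed channel lists, eliminating A's separate re-indexing pass.
import Mathlib
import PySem

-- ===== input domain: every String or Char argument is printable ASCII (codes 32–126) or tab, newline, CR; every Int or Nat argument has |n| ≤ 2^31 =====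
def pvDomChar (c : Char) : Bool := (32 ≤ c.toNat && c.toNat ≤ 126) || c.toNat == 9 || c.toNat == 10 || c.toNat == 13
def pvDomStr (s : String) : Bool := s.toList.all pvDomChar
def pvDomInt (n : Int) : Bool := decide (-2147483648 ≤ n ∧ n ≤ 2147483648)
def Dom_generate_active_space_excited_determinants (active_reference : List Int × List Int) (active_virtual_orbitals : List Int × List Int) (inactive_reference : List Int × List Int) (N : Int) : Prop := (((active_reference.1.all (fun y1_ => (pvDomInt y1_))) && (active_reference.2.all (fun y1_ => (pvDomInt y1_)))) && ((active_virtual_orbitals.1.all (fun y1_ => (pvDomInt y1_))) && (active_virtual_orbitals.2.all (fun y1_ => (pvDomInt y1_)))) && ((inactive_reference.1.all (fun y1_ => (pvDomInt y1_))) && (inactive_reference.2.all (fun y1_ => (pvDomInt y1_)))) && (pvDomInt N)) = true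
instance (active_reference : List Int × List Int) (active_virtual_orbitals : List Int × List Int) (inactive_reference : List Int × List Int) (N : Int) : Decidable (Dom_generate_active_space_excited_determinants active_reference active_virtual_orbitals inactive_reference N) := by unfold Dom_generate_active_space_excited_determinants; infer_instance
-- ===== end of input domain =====

-- B builds each spin channel once per excitation level — filtering a pre-sorted deduplicated
-- reference and inserting virtuals into the sorted list — and pairs the two channel lists,
-- instead of A's four nested loops rebuilding a set difference + full sort per output pair
-- followed by a separate re-indexing pass; same return value (alternative decomposition).

-- ===== PORT A =====
-- itertools.combinations (index-order r-subsequences; also the exact recursion of Source B's _combs)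
def pvComb : List Int → Nat → List (List Int)
  | _, 0 => [[]]
  | [], _ + 1 => []
  | x :: xs, n + 1 => (pvComb xs n).map (x :: ·) ++ pvComb xs (n + 1)

-- sorted(list(set(ref) - set(occ)) + list(virt))
def pvExcite (ref occ virt : List Int) : List Int :=
  PySem.List.sorted (PySem.Set.diff (PySem.Set.ofList ref) occ ++ virt) (fun x => x) false

def generate_active_space_excited_determinants (active_reference : List Int × List Int) (active_virtual_orbitals : List Int × List Int) (inactive_reference : List Int × List Int) (N : Int) : List (List Int × List Int) :=
  let refA := active_reference.1
  let refB := active_reference.2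
  let virtA := active_virtual_orbitals.1
  let virtB := active_virtual_orbitals.2
  let core := (PySem.List.pyRange 0 (N + 1) 1).foldl (fun acc n_alpha =>
    let n_beta := N - n_alpha
    if n_alpha > (refA.length : Int) ∨ n_beta > (refB.length : Int) then acc
    else if n_alpha > (virtA.length : Int) ∨ n_beta > (virtB.length : Int) then acc
    else acc ++
      ((pvComb refA n_alpha.toNat).flatMap fun occ_alpha =>
       (pvComb virtA n_alpha.toNat).flatMap fun virt_alpha =>
       (pvComb refB n_beta.toNat).flatMap fun occ_beta =>
       (pvComb virtB n_beta.toNat).map fun virt_beta =>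
         (pvExcite refA occ_alpha virt_alpha, pvExcite refB occ_beta virt_beta))) []
  -- the final re-indexing loop: replace each entry by the inactive-prefixed pair
  core.map (fun d => (inactive_reference.1 ++ d.1, inactive_reference.2 ++ d.2))

-- ===== PORT B =====
-- _insort's linear scan: skip past elements ≤ x, insert x there (exact port of the while loop)
def bInsort (det : List Int) (x : Int) : List Int :=
  match det with
  | [] => [x]
  | y :: t => if y ≤ x then y :: bInsort t x else x :: y :: t

-- _channel_dets: base = sorted(set(ref)); per occ the kept list once; virtuals inserted in order
def bChannel (pre ref virt : List Int) (n : Nat) : List (List Int) :=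
  let base := PySem.List.sorted (PySem.Set.ofList ref) (fun x => x) false
  (pvComb ref n).flatMap fun occ =>
    let kept := base.filter (fun x => !occ.contains x)
    (pvComb virt n).map fun v =>
      pre ++ v.foldl (fun d x => bInsort d x) kept

def generate_active_space_excited_determinants_alt (active_reference : List Int × List Int) (active_virtual_orbitals : List Int × List Int) (inactive_reference : List Int × List Int) (N : Int) : List (List Int × List Int) :=
  (PySem.List.pyRange 0 (N + 1) 1).foldl (fun out n_alpha =>
    let n_beta := N - n_alpha
    if n_alpha > (active_reference.1.length : Int) ∨ n_beta > (active_reference.2.length : Int) then out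
    else if n_alpha > (active_virtual_orbitals.1.length : Int) ∨ n_beta > (active_virtual_orbitals.2.length : Int) then out
    else
      let alpha_dets := bChannel inactive_reference.1 active_reference.1 active_virtual_orbitals.1 n_alpha.toNat
      let beta_dets := bChannel inactive_reference.2 active_reference.2 active_virtual_orbitals.2 n_beta.toNat
      out ++ alpha_dets.flatMap (fun a => beta_dets.map (fun b => (a, b)))) []

-- ===== PRECONDITION & SPEC =====
def Spec_generate_active_space_excited_determinants (active_reference : List Int × List Int) (active_virtual_orbitals : List Int × List Int) (inactive_reference : List Int × List Int) (N : Int) (out : List (List Int × List Int)) : Prop := out = generate_active_space_excited_determinants_alt active_reference active_virtual_orbitals inactive_reference N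
instance (active_reference : List Int × List Int) (active_virtual_orbitals : List Int × List Int) (inactive_reference : List Int × List Int) (N : Int) (out : List (List Int × List Int)) : Decidable (Spec_generate_active_space_excited_determinants active_reference active_virtual_orbitals inactive_reference N out) := by unfold Spec_generate_active_space_excited_determinants; infer_instance

-- ===== CLAIM (what is proved, stated in full; the proofs are below) =====
def Claim_equal_generate_active_space_excited_determinants : Prop := ∀ (active_reference : List Int × List Int) (active_virtual_orbitals : List Int × List Int) (inactive_reference : List Int × List Int) (N : Int), Dom_generate_active_space_excited_determinants active_reference active_virtual_orbitals inactive_reference N → Spec_generate_active_space_excited_determinants active_reference active_virtual_orbitals inactive_reference N (generate_active_space_excited_determinants active_reference active_virtual_orbitals inactive_reference N)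

-- ===== LEMMAS AND PROOFS =====

-- Source B's linear insort is PySem's insertion-sort step
lemma bInsort_eq_insertBy (det : List Int) (x : Int) :
    bInsort det x = PySem.List.insertBy (fun a b => decide (a < b)) x det := by
  induction det with
  | nil => rfl
  | cons y t ih =>
    simp only [bInsort, PySem.List.insertBy, ih]
    by_cases h : y ≤ x
    · simp [h, not_lt.mpr h]
    · simp [h, lt_of_not_ge h]

-- filtering commutes with sorting (identity key, ints)
lemma sorted_filter (p : Int → Bool) (xs : List Int) :
    PySem.List.sorted (xs.filter p) (fun x => x) false
      = (PySem.List.sorted xs (fun x => x) false).filter p :=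
  PySem.List.sorted_id_eq_of_perm_of_pairwise _ _
    ((PySem.List.sorted_perm xs _ false).filter p)
    ((PySem.List.sorted_pairwise xs _).filter p)

-- A's per-pair construction equals B's filter-then-insert construction
lemma pvExcite_eq (ref occ v : List Int) :
    pvExcite ref occ v
      = v.foldl (fun d x => bInsort d x)
          ((PySem.List.sorted (PySem.Set.ofList ref) (fun x => x) false).filter
            (fun x => !occ.contains x)) := by
  have hins : (fun (d : List Int) (x : Int) => bInsort d x)
      = (fun acc x => PySem.List.insertBy (fun a b => decide (a < b)) x acc) := by
    funext d x; exact bInsort_eq_insertBy d x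
  rw [pvExcite, hins, ← sorted_filter]
  show PySem.List.sorted (List.filter _ (PySem.Set.ofList ref) ++ v) (fun x => x) false = _
  rw [PySem.List.sorted_eq_foldl_insertBy, PySem.List.sorted_eq_foldl_insertBy,
    List.foldl_append]
  rfl

-- A's four nested loops with the prefix mapped over them = B's channel-product block
lemma pvBlock_eq (p1 p2 refA refB vA vB : List Int) (na nb : Nat) :
    ((pvComb refA na).flatMap fun oA => (pvComb vA na).flatMap fun wA =>
      (pvComb refB nb).flatMap fun oB => (pvComb vB nb).map fun wB =>
        (pvExcite refA oA wA, pvExcite refB oB wB)).map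
      (fun d => (p1 ++ d.1, p2 ++ d.2))
    = (bChannel p1 refA vA na).flatMap
        (fun a => (bChannel p2 refB vB nb).map fun b => (a, b)) := by
  simp only [bChannel, pvExcite_eq]
  simp [List.map_flatMap, List.flatMap_assoc, List.flatMap_map, List.map_map, Function.comp_def]

-- ===== VERDICT (by name: the statement is the Claim_ definition above) =====
theorem generate_active_space_excited_determinants_spec : Claim_equal_generate_active_space_excited_determinants := by
  intro ar av ir N _
  unfold Spec_generate_active_space_excited_determinants
  unfold generate_active_space_excited_determinants generate_active_space_excited_determinants_alt
  simp only []
  generalize PySem.List.pyRange 0 (N + 1) 1 = l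
  suffices h : ∀ (l : List Int) (acc : List (List Int × List Int)),
      (l.foldl (fun acc n_alpha =>
        if n_alpha > (ar.1.length : Int) ∨ N - n_alpha > (ar.2.length : Int) then acc
        else if n_alpha > (av.1.length : Int) ∨ N - n_alpha > (av.2.length : Int) then acc
        else acc ++
          ((pvComb ar.1 n_alpha.toNat).flatMap fun oA =>
           (pvComb av.1 n_alpha.toNat).flatMap fun wA =>
           (pvComb ar.2 (N - n_alpha).toNat).flatMap fun oB =>
           (pvComb av.2 (N - n_alpha).toNat).map fun wB =>
             (pvExcite ar.1 oA wA, pvExcite ar.2 oB wB))) acc).map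
        (fun d => (ir.1 ++ d.1, ir.2 ++ d.2))
      = l.foldl (fun out n_alpha =>
          if n_alpha > (ar.1.length : Int) ∨ N - n_alpha > (ar.2.length : Int) then out
          else if n_alpha > (av.1.length : Int) ∨ N - n_alpha > (av.2.length : Int) then out
          else out ++
            (bChannel ir.1 ar.1 av.1 n_alpha.toNat).flatMap
              (fun a => (bChannel ir.2 ar.2 av.2 (N - n_alpha).toNat).map fun b => (a, b)))
          (acc.map (fun d => (ir.1 ++ d.1, ir.2 ++ d.2))) by
    simpa using h l []
  intro l
  induction l with
  | nil => intro acc; simp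
  | cons n t ih =>
    intro acc
    simp only [List.foldl_cons]
    rw [ih]
    congr 1
    split_ifs with h1 h2
    · rfl
    · rfl
    · rw [List.map_append, pvBlock_eq]
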